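-- pv_equiv track=rewrite | github.com/Rajn013/PPT-assignment-5 | PPT assignment 5 (1).py | convert_to_2d
-- ===== SOURCE A (Python) =====
-- def convert_to_2d(original, m, n):
--     if len(original) != m * n:
--         return[]
--
--     result =[[0] * n for _ in range(m)]
--
--     for i in range(len(original)):
--         row = i // n
--         col = i % n
--         result[row][col] = original[i]
--
--     return result
-- ===== SOURCE B (Python) =====
-- def convert_to_2d(original, m, n):
--     if len(original) != m * n:
--         return []
--     return [original[i * n:(i + 1) * n] for i in range(m)]
-- ===== Notes on version B (the rewrite author's own statement) =====
-- stated objective: simpler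
-- what changed: B builds the matrix row by row with contiguous slices instead of preallocating a zero matrix and scattering every element into it via i//n and i%n index arithmetic.
-- outside the precondition, e.g. on convert_to_2d([1, 2, 3, 4, 5, 6], -2, -3): A raises IndexError, B returns []
-- crash fix: When len(original) == m*n > 0 with m < 0 (hence n < 0), A raises IndexError while writing into the empty preallocated result; B returns []. — e.g. on convert_to_2d([1, 2, 3, 4, 5, 6], -2, -3): A raises IndexError, B returns []
import Mathlib
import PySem

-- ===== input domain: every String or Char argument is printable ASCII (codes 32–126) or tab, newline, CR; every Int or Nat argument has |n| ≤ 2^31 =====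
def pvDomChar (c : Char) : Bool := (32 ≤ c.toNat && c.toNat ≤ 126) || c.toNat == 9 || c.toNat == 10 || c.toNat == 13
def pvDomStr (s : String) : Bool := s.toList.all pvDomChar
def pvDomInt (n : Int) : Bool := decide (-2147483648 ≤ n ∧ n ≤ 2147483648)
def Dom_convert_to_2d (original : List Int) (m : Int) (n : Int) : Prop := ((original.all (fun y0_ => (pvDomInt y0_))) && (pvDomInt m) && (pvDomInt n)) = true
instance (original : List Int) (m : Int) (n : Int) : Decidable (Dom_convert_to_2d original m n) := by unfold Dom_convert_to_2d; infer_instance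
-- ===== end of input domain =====

-- B reshapes by taking the m contiguous row slices instead of preallocating a zero
-- matrix and scattering each element via i//n and i%n (objective: simpler).

-- ===== PORT A =====
-- pySetD/pyGetD are the total forms of result[row][col] = original[i] / original[i];
-- under Pre_ every index written or read is in range, so they are exact there.
def convert_to_2d (original : List Int) (m : Int) (n : Int) : List (List Int) :=
  if (original.length : Int) ≠ m * n then []
  else
    -- result = [[0] * n for _ in range(m)]
    let result : List (List Int) :=
      (PySem.List.pyRange 0 m 1).map (fun _ => List.replicate n.toNat 0)
    -- for i in range(len(original)): result[i // n][i % n] = original[i]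
    (PySem.List.pyRange 0 (original.length : Int) 1).foldl
      (fun res i =>
        let row := PySem.Int.floordiv i n
        let col := PySem.Int.mod i n
        PySem.List.pySetD res row
          (PySem.List.pySetD (PySem.List.pyGetD res row []) col
            (PySem.List.pyGetD original i 0)))
      result

-- ===== PORT B =====
def convert_to_2d_alt (original : List Int) (m : Int) (n : Int) : List (List Int) :=
  if (original.length : Int) ≠ m * n then []
  else
    -- [original[i*n:(i+1)*n] for i in range(m)]
    (PySem.List.pyRange 0 m 1).map
      (fun i => PySem.List.slice original (some (i * n)) (some ((i + 1) * n)))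

-- ===== PRECONDITION & SPEC =====
-- Pre_ excludes exactly the inputs where A raises IndexError: a nonempty original with
-- len(original) = m*n and m < 0 (hence n < 0), where A scatters into an empty result.
def Pre_convert_to_2d (original : List Int) (m : Int) (n : Int) : Prop :=
  (original.length : Int) = m * n → 0 < original.length → 0 ≤ m
instance (original : List Int) (m : Int) (n : Int) : Decidable (Pre_convert_to_2d original m n) := by unfold Pre_convert_to_2d; infer_instance
def pvWitness_convert_to_2d : List Int × Int × Int := ([1, 2, 3, 4, 5, 6], 2, 3)

-- On a nonempty original with len(original) = m*n and m < 0, A raises IndexError; B returns [].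
def Raises_convert_to_2d (original : List Int) (m : Int) (n : Int) : Prop :=
  (original.length : Int) = m * n ∧ 0 < original.length ∧ m < 0
instance (original : List Int) (m : Int) (n : Int) : Decidable (Raises_convert_to_2d original m n) := by unfold Raises_convert_to_2d; infer_instance
def pvRaiseWitness_convert_to_2d : List Int × Int × Int := ([1, 2, 3, 4, 5, 6], -2, -3)
def pvRaiseWitnessOut_convert_to_2d : List (List Int) := []

def Spec_convert_to_2d (original : List Int) (m : Int) (n : Int) (out : List (List Int)) : Prop := out = convert_to_2d_alt original m n
instance (original : List Int) (m : Int) (n : Int) (out : List (List Int)) : Decidable (Spec_convert_to_2d original m n out) := by unfold Spec_convert_to_2d; infer_instance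

-- ===== CLAIM (what is proved, stated in full; the proofs are below) =====
def Claim_equal_convert_to_2d : Prop := ∀ (original : List Int) (m : Int) (n : Int), Dom_convert_to_2d original m n → Pre_convert_to_2d original m n → Spec_convert_to_2d original m n (convert_to_2d original m n)
def Claim_raises_convert_to_2d : Prop := (∀ (original : List Int) (m : Int) (n : Int), Dom_convert_to_2d original m n → Raises_convert_to_2d original m n → ¬ Pre_convert_to_2d original m n) ∧ (Dom_convert_to_2d (pvRaiseWitness_convert_to_2d.1) (pvRaiseWitness_convert_to_2d.2.1) (pvRaiseWitness_convert_to_2d.2.2) ∧ Raises_convert_to_2d (pvRaiseWitness_convert_to_2d.1) (pvRaiseWitness_convert_to_2d.2.1) (pvRaiseWitness_convert_to_2d.2.2) ∧ convert_to_2d_alt (pvRaiseWitness_convert_to_2d.1) (pvRaiseWitness_convert_to_2d.2.1) (pvRaiseWitness_convert_to_2d.2.2) = pvRaiseWitnessOut_convert_to_2d)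

-- ===== LEMMAS AND PROOFS =====

def pvStep (orig : List Int) (N : Nat) (res : List (List Int)) (k : Nat) : List (List Int) :=
  res.set (k / N) ((res.getD (k / N) []).set (k % N) (orig.getD k 0))

theorem pv_set_append_len {α : Type} (Q : List α) (y v : α) :
    (Q ++ [y]).set Q.length v = Q ++ [v] := by
  induction Q with
  | nil => rfl
  | cons a Q ih => simp [ih]

theorem pv_getD_append_len {α : Type} (Q : List α) (y d : α) :
    (Q ++ [y]).getD Q.length d = y := by
  induction Q with
  | nil => rfl
  | cons a Q ih => simpa using ih

theorem pv_fill (orig : List Int) (s : Nat) :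
    ∀ (n : Nat) (row : List Int), n ≤ row.length →
    (List.range n).foldl (fun r j => r.set j (orig.getD (s + j) 0)) row
      = (List.range n).map (fun j => orig.getD (s + j) 0) ++ row.drop n := by
  intro n
  induction n with
  | zero => simp
  | succ n ih =>
    intro row h
    rw [List.range_succ, List.foldl_append, ih row (by omega)]
    simp only [List.foldl_cons, List.foldl_nil]
    have hA : ((List.range n).map (fun j => orig.getD (s + j) 0)).length = n := by simp
    rw [List.set_append]
    simp only [hA, lt_irrefl, Nat.sub_self]
    have hd : row.drop n = row[n] :: row.drop (n + 1) :=
      List.drop_eq_getElem_cons (by omega)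
    rw [hd]
    simp [List.set]

theorem pv_fillRow (orig : List Int) (s N : Nat) (h : s + N ≤ orig.length) :
    (List.range N).foldl (fun r j => r.set j (orig.getD (s + j) 0)) (List.replicate N 0)
      = (orig.drop s).take N := by
  rw [pv_fill orig s N (List.replicate N 0) (by simp)]
  apply List.ext_getElem
  · simp; omega
  · intro j h1 h2
    have hj : j < N := by simpa using h1
    have hb : s + j < orig.length := by omega
    rw [List.getElem_append_left (by simpa using hj)]
    simp [List.getElem?_eq_getElem hb]

theorem pv_keepLast (orig : List Int) (N M : Nat) :
    ∀ (ks : List Nat), (∀ k ∈ ks, k / N < M) →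
    ∀ (P : List (List Int)) (x : List Int), P.length = M →
    ks.foldl (pvStep orig N) (P ++ [x]) = ks.foldl (pvStep orig N) P ++ [x] := by
  intro ks
  induction ks with
  | nil => intro _ P x _; rfl
  | cons k ks ih =>
    intro h P x hP
    simp only [List.foldl_cons]
    have hk : k / N < P.length := by rw [hP]; exact h k (by simp)
    have h1 : pvStep orig N (P ++ [x]) k = pvStep orig N P k ++ [x] := by
      unfold pvStep
      rw [List.getD_append _ _ _ _ hk, List.set_append, if_pos hk]
    rw [h1]
    exact ih (fun k hk' => h k (by simp [hk'])) _ x (by simp [pvStep, hP])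

theorem pv_lastRow (orig : List Int) (N M : Nat) (hN : 0 < N) :
    ∀ (js : List Nat), (∀ j ∈ js, j < N) →
    ∀ (Q : List (List Int)) (y : List Int), Q.length = M →
    js.foldl (fun r j => pvStep orig N r (M * N + j)) (Q ++ [y])
      = Q ++ [js.foldl (fun r j => r.set j (orig.getD (M * N + j) 0)) y] := by
  intro js
  induction js with
  | nil => intro _ Q y _; rfl
  | cons j js ih =>
    intro h Q y hQ
    simp only [List.foldl_cons]
    have hj : j < N := h j (by simp)
    have hdiv : (M * N + j) / N = M := by
      rw [Nat.add_comm, Nat.add_mul_div_right _ _ hN, Nat.div_eq_of_lt hj]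
      omega
    have hmod : (M * N + j) % N = j := by
      rw [Nat.add_comm, Nat.add_mul_mod_self_right, Nat.mod_eq_of_lt hj]
    have h1 : pvStep orig N (Q ++ [y]) (M * N + j)
        = Q ++ [y.set j (orig.getD (M * N + j) 0)] := by
      unfold pvStep
      rw [hdiv, hmod, ← hQ, pv_getD_append_len, pv_set_append_len]
    rw [h1]
    exact ih (fun j hj' => h j (by simp [hj'])) Q _ hQ

theorem pv_scatter (orig : List Int) (N : Nat) (hN : 0 < N) :
    ∀ (M : Nat), M * N ≤ orig.length →
    (List.range (M * N)).foldl (pvStep orig N)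
        (List.replicate M (List.replicate N 0))
      = (List.range M).map (fun r => (orig.drop (r * N)).take N) := by
  intro M
  induction M with
  | zero => simp
  | succ M ih =>
    intro hlen
    have hMN : (M + 1) * N = M * N + N := by ring
    rw [hMN] at hlen
    rw [hMN, List.range_add, List.foldl_append,
        List.replicate_succ' (n := M)]
    rw [pv_keepLast orig N M (List.range (M * N))
          (fun k hk => Nat.div_lt_of_lt_mul (by simpa [Nat.mul_comm] using List.mem_range.mp hk))
          _ _ (by simp)]
    rw [ih (by omega)]
    rw [List.foldl_map]
    rw [pv_lastRow orig N M hN (List.range N)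
          (fun j hj => List.mem_range.mp hj) _ _ (by simp)]
    rw [pv_fillRow orig (M * N) N (by omega)]
    rw [List.range_succ, List.map_append]
    simp

theorem convert_to_2d_main (original : List Int) (m n : Int)
    (hpre : Pre_convert_to_2d original m n) :
    convert_to_2d original m n = convert_to_2d_alt original m n := by
  unfold Pre_convert_to_2d at hpre
  unfold convert_to_2d convert_to_2d_alt
  by_cases hg : (original.length : Int) = m * n
  · rw [if_neg (not_not_intro hg), if_neg (not_not_intro hg)]
    by_cases hm : m ≤ 0
    · -- m ≤ 0: under Pre_ the list is empty and range(m) is empty, both sides are []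
      have hlen : original.length = 0 := by
        by_contra hne
        have h0 : 0 < original.length := by omega
        have hm0 : m = 0 := by have := hpre hg h0; omega
        rw [hm0, zero_mul] at hg
        omega
      have horig : original = [] := List.length_eq_zero_iff.mp hlen
      have hr : PySem.List.pyRange 0 m 1 = [] := by
        rw [PySem.List.pyRange_one]
        have : (m - 0).toNat = 0 := by omega
        rw [this]; rfl
      rw [horig, hr]
      simp
    · have hmpos : 0 < m := by omega
      by_cases hn : n ≤ 0
      · -- then m*n ≤ 0, so length = 0 and n = 0
        rcases lt_or_eq_of_le hn with hneg | h0
        · exfalso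
          have : m * n < 0 := mul_neg_of_pos_of_neg hmpos hneg
          omega
        · subst h0
          rw [mul_zero] at hg
          have horig : original = [] := List.length_eq_zero_iff.mp (by omega)
          subst horig
          rw [show ((List.length ([] : List Int) : Int)) = ((0 : Nat) : Int) by simp,
              PySem.List.pyRange_zero_nat 0]
          simp only [List.range_zero, List.map_nil, List.foldl_nil]
          apply List.map_congr_left
          intro i hi
          have hi0 : 0 ≤ i := by
            have := (PySem.List.mem_pyRange_one).mp hi
            omega
          simp only [Int.toNat_zero, List.replicate_zero, mul_zero]
          rw [PySem.List.slice_toNat _ le_rfl le_rfl]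
          simp
      · -- main case: 0 < m, 0 < n
        have hnpos : 0 < n := by omega
        set M := m.toNat with hM
        set N := n.toNat with hN
        have hm' : m = (M : Int) := by omega
        have hn' : n = (N : Int) := by omega
        have hNpos : 0 < N := by omega
        have hlen : original.length = M * N := by
          have : (original.length : Int) = (M : Int) * (N : Int) := by rw [← hm', ← hn']; exact hg
          exact_mod_cast this
        -- A side
        have hA :
            (PySem.List.pyRange 0 (original.length : Int) 1).foldl
              (fun res i =>
                PySem.List.pySetD res (PySem.Int.floordiv i n)
                  (PySem.List.pySetD (PySem.List.pyGetD res (PySem.Int.floordiv i n) []) (PySem.Int.mod i n)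
                    (PySem.List.pyGetD original i 0)))
              ((PySem.List.pyRange 0 m 1).map (fun _ => List.replicate n.toNat 0))
            = (List.range (M * N)).foldl (pvStep original N)
                (List.replicate M (List.replicate N 0)) := by
          rw [hlen, hm', hn', PySem.List.pyRange_zero_nat (M * N), PySem.List.pyRange_zero_nat M,
              List.foldl_map, List.map_map]
          congr 1
          · funext res k
            rw [PySem.Int.floordiv_natCast, PySem.Int.mod_natCast,
                PySem.List.pySetD_natCast, PySem.List.pyGetD_natCast,
                PySem.List.pySetD_natCast, PySem.List.pyGetD_natCast]
            rfl
          · rw [show ((fun _ => List.replicate (N : Int).toNat (0 : Int)) ∘ (fun k : Nat => (k : Int)))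
                  = Function.const Nat (List.replicate N 0) by funext k; simp,
                List.map_const, List.length_range]
        rw [hA, pv_scatter original N hNpos M (by omega)]
        -- B side
        rw [hm', PySem.List.pyRange_zero_nat M, List.map_map]
        apply List.map_congr_left
        intro k _
        simp only [Function.comp_apply]
        rw [hn']
        rw [show ((k : Int) * (N : Int)) = ((k * N : Nat) : Int) by push_cast; ring,
            show ((k : Int) + 1) * (N : Int) = ((k * N : Nat) : Int) + ((N : Nat) : Int) by push_cast; ring,
            PySem.List.slice_natCast_add]
  · rw [if_pos hg, if_pos hg]

-- ===== VERDICT (by name: the statement is the Claim_ definition above) =====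
theorem convert_to_2d_spec : Claim_equal_convert_to_2d := by
  intro original m n _ hpre
  unfold Spec_convert_to_2d
  exact convert_to_2d_main original m n hpre

@[simp] theorem convert_to_2d_raises : Claim_raises_convert_to_2d := by
  unfold Claim_raises_convert_to_2d
  exact ⟨by intro original m n _ hr hpre; obtain ⟨h1, h2, h3⟩ := hr; have := hpre h1 h2; omega,
    by decide⟩
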